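-- pv_equiv track=rewrite | github.com/KevinKolb/channelinsights | archive/scripts/_get_partners.py | organize_by_country
-- ===== SOURCE A (Python) =====
-- from typing import Dict, List, Optional
--
-- def organize_by_country(entities: List[Dict], key: str = 'entities',
--                         category: Optional[str] = None, sub_type: Optional[str] = None) -> Dict[str, Dict]:
--     """Organize entities by country, optionally adding category and sub_type."""
--     organized = {
--         "United States": {key: []},
--         "Canada": {key: []},
--         "Mexico": {key: []}
--     }
--
--     for entity in entities:
--         country = entity.get('country', 'United States')
--         if country in organized:
--             entity_data = {k: v for k, v in entity.items() if k != 'country'}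
--             # Add category and sub_type if provided
--             if category and 'category' not in entity_data:
--                 entity_data['category'] = category
--             if sub_type and 'sub_type' not in entity_data:
--                 entity_data['sub_type'] = sub_type
--             organized[country][key].append(entity_data)
--
--     for country in organized:
--         organized[country][key].sort(key=lambda x: x.get('name', ''))
--
--     return organized
-- ===== SOURCE B (Python) =====
-- def organize_by_country(entities, key='entities', category=None, sub_type=None):
--     """Organize entities by country, optionally adding category and sub_type."""
--     def strip(entity):
--         data = {k: v for k, v in entity.items() if k != 'country'}
--         if category and 'category' not in data:
--             data['category'] = category
--         if sub_type and 'sub_type' not in data: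
--             data['sub_type'] = sub_type
--         return data
--
--     ranked = sorted(entities, key=lambda e: e.get('name', ''))
--     return {c: {key: [strip(e) for e in ranked
--                       if e.get('country', 'United States') == c]}
--             for c in ("United States", "Canada", "Mexico")}
-- ===== Notes on version B (the rewrite author's own statement) =====
-- stated objective: alternative
-- what changed: B replaces A's mutable dict-of-buckets loop plus three in-place per-bucket sorts by one global stable sort on name followed by pure per-country filter/map comprehensions (no mutation, no per-bucket sorting).
import Mathlib
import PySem

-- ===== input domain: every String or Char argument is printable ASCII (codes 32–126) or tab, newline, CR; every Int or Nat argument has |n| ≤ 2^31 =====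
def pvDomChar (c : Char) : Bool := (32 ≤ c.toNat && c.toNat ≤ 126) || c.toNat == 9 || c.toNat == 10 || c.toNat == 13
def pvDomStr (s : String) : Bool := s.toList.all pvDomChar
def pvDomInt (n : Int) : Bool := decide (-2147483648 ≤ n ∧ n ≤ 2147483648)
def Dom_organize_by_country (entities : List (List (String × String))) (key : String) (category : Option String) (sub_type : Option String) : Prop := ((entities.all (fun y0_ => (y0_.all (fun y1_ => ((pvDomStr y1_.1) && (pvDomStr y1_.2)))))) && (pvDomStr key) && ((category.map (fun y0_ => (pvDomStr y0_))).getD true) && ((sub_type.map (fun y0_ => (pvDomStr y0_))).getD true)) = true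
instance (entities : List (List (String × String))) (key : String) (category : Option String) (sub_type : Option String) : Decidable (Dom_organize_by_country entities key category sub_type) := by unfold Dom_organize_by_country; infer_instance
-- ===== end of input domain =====

-- B replaces A's mutable dict-of-buckets loop plus three in-place per-bucket sorts by one global
-- stable sort on name followed by pure per-country filter/map comprehensions (alternative; not faster).

-- shared helpers (both Pythons contain this identical code): dict get with default (first match),
-- truthiness of an Optional[str], and the entity_data construction (drop 'country', guarded adds).
def pvGetS (l : List (String × String)) (k d : String) : String :=
  ((l.find? (fun p => p.1 == k)).map (·.2)).getD d

def pvTruthy (o : Option String) : Bool := o.getD "" != ""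

-- "if <o> and <name> not in entity_data: entity_data[<name>] = <o>"
def pvAddKey (o : Option String) (name : String) (ed : List (String × String)) : List (String × String) :=
  if pvTruthy o && !(ed.any (fun p => p.1 == name)) then ed ++ [(name, o.getD "")] else ed

def pvEntityData (category sub_type : Option String) (entity : List (String × String)) : List (String × String) :=
  pvAddKey sub_type "sub_type" (pvAddKey category "category" (entity.filter (fun p => p.1 != "country")))

-- ===== PORT A =====
def organize_by_country (entities : List (List (String × String))) (key : String) (category : Option String) (sub_type : Option String) : List (String × List (String × List (List (String × String)))) :=
  -- one loop dispatching each entity into one of the three buckets of `organized`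
  let st := entities.foldl (fun st entity =>
      let country := pvGetS entity "country" "United States"
      if country == "United States" then (st.1 ++ [pvEntityData category sub_type entity], st.2.1, st.2.2)
      else if country == "Canada" then (st.1, st.2.1 ++ [pvEntityData category sub_type entity], st.2.2)
      else if country == "Mexico" then (st.1, st.2.1, st.2.2 ++ [pvEntityData category sub_type entity])
      else st) ([], [], [])
  -- final per-bucket in-place stable sort by name
  [("United States", [(key, PySem.List.sorted st.1 (fun x => pvGetS x "name" "") false)]),
   ("Canada", [(key, PySem.List.sorted st.2.1 (fun x => pvGetS x "name" "") false)]),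
   ("Mexico", [(key, PySem.List.sorted st.2.2 (fun x => pvGetS x "name" "") false)])]

-- ===== PORT B =====
def organize_by_country_alt (entities : List (List (String × String))) (key : String) (category : Option String) (sub_type : Option String) : List (String × List (String × List (List (String × String)))) :=
  let ranked := PySem.List.sorted entities (fun e => pvGetS e "name" "") false
  ["United States", "Canada", "Mexico"].map (fun c =>
    (c, [(key, (ranked.filter (fun e => pvGetS e "country" "United States" == c)).map
                 (pvEntityData category sub_type))]))

-- ===== PRECONDITION & SPEC =====
-- explicit DecidableEq chain for the nested return type (plain instance search stops one level short)
def pvDec0 : DecidableEq (List (String × String)) := inferInstance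
def pvDec1 : DecidableEq (List (List (String × String))) := @instDecidableEqList _ pvDec0
def pvDec2 : DecidableEq (String × List (List (String × String))) := @instDecidableEqProd _ _ _ pvDec1
def pvDec3 : DecidableEq (List (String × List (List (String × String)))) := @instDecidableEqList _ pvDec2
def pvDec4 : DecidableEq (String × List (String × List (List (String × String)))) := @instDecidableEqProd _ _ _ pvDec3
def pvDec5 : DecidableEq (List (String × List (String × List (List (String × String))))) := @instDecidableEqList _ pvDec4

def Spec_organize_by_country (entities : List (List (String × String))) (key : String) (category : Option String) (sub_type : Option String) (out : List (String × List (String × List (List (String × String))))) : Prop := out = organize_by_country_alt entities key category sub_type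
instance (entities : List (List (String × String))) (key : String) (category : Option String) (sub_type : Option String) (out : List (String × List (String × List (List (String × String))))) : Decidable (Spec_organize_by_country entities key category sub_type out) := by unfold Spec_organize_by_country; exact pvDec5 out _

-- ===== CLAIM (what is proved, stated in full; the proofs are below) =====
def Claim_equal_organize_by_country : Prop := ∀ (entities : List (List (String × String))) (key : String) (category : Option String) (sub_type : Option String), Dom_organize_by_country entities key category sub_type → Spec_organize_by_country entities key category sub_type (organize_by_country entities key category sub_type)

-- ===== LEMMAS AND PROOFS =====

-- looking up a key other than the dropped one is unaffected by dropping the 'country' pairs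
theorem pvGetS_filter_ne (l : List (String × String)) (k q d : String) (h : k ≠ q) :
    pvGetS (l.filter (fun p => p.1 != q)) k d = pvGetS l k d := by
  induction l with
  | nil => rfl
  | cons hd tl ih =>
    by_cases hq : hd.1 = q
    · have hk : (q == k) = false := by simp; exact fun e => h e.symm
      simpa [pvGetS, List.filter_cons, List.find?_cons, hq, hk, h] using ih
    · by_cases hk : hd.1 = k
      · simp [pvGetS, hk, h]
      · simpa [pvGetS, List.filter_cons, hq, hk, h] using ih

-- appending a pair with a different key does not change a lookup
theorem pvGetS_append_single (l : List (String × String)) (k v q d : String) (h : k ≠ q) :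
    pvGetS (l ++ [(k, v)]) q d = pvGetS l q d := by
  simp only [pvGetS, List.find?_append]
  cases hf : l.find? (fun p => p.1 == q) with
  | some p => simp
  | none => simp [h]

theorem pvGetS_addKey (o : Option String) (nm : String) (ed : List (String × String))
    (h : nm ≠ "name") : pvGetS (pvAddKey o nm ed) "name" "" = pvGetS ed "name" "" := by
  unfold pvAddKey
  split_ifs with h1
  · exact pvGetS_append_single ed nm (o.getD "") "name" "" h
  · rfl

-- the sort key ('name' lookup, default '') of an entity_data equals that of the raw entity
theorem pvName_entityData (category sub_type : Option String) (e : List (String × String)) :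
    pvGetS (pvEntityData category sub_type e) "name" "" = pvGetS e "name" "" := by
  unfold pvEntityData
  rw [pvGetS_addKey _ _ _ (by decide), pvGetS_addKey _ _ _ (by decide),
      pvGetS_filter_ne _ _ _ _ (by decide)]

-- inserting an element that precedes every member puts it in front
theorem insertBy_cons_of_forall {α : Type} (bfr : α → α → Bool) (x : α) (m : List α)
    (h : ∀ z ∈ m, bfr x z = true) : PySem.List.insertBy bfr x m = x :: m := by
  cases m with
  | nil => rfl
  | cons y ys => simp [PySem.List.insertBy, h y (by simp)]

-- insertBy preserves sortedness of the accumulator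
theorem pairwise_insertBy {α κ : Type} [LinearOrder κ] (k : α → κ) (x : α) (m : List α)
    (h : m.Pairwise (fun a b => k a ≤ k b)) :
    (PySem.List.insertBy (fun a b => decide (k a < k b)) x m).Pairwise (fun a b => k a ≤ k b) := by
  induction m with
  | nil => simp [PySem.List.insertBy]
  | cons y ys ih =>
    rcases List.pairwise_cons.mp h with ⟨hy, ht⟩
    by_cases hb : k x < k y
    · simp only [PySem.List.insertBy, hb, decide_true, if_pos]
      refine List.pairwise_cons.mpr ⟨?_, List.pairwise_cons.mpr ⟨hy, ht⟩⟩
      intro z hz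
      rcases List.mem_cons.mp hz with rfl | hz
      · exact le_of_lt hb
      · exact le_trans (le_of_lt hb) (hy z hz)
    · simp only [PySem.List.insertBy, hb, decide_false, Bool.false_eq_true, if_false]
      refine List.pairwise_cons.mpr ⟨?_, ih ht⟩
      intro z hz
      rcases (PySem.List.mem_insertBy _ x z ys).mp hz with rfl | hz
      · exact le_of_not_gt hb
      · exact hy z hz

-- filtering commutes with a stable insertion into a sorted accumulator
theorem filter_insertBy {α κ : Type} [LinearOrder κ] (k : α → κ) (p : α → Bool) (x : α) (m : List α)
    (h : m.Pairwise (fun a b => k a ≤ k b)) :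
    (PySem.List.insertBy (fun a b => decide (k a < k b)) x m).filter p
      = if p x then PySem.List.insertBy (fun a b => decide (k a < k b)) x (m.filter p)
        else m.filter p := by
  induction m with
  | nil => cases hx : p x <;> simp [PySem.List.insertBy, hx]
  | cons y ys ih =>
    rcases List.pairwise_cons.mp h with ⟨hy, ht⟩
    by_cases hb : k x < k y
    · have hall : ∀ z ∈ ys.filter p, (fun a b => decide (k a < k b)) x z = true := by
        intro z hz
        exact decide_eq_true (lt_of_lt_of_le hb (hy z (List.mem_of_mem_filter hz)))
      have hins := insertBy_cons_of_forall (fun a b => decide (k a < k b)) x (ys.filter p) hall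
      cases hx : p x <;> cases hyy : p y <;>
        simp [PySem.List.insertBy, hb, hx, hyy, hins]
    · cases hx : p x <;> cases hyy : p y <;>
        simp [PySem.List.insertBy, hb, hx, hyy, ih ht]

-- filtering a whole insertion-sort fold commutes with filtering the input
theorem filter_foldl_insertBy {α κ : Type} [LinearOrder κ] (k : α → κ) (p : α → Bool) :
    ∀ (l acc : List α), acc.Pairwise (fun a b => k a ≤ k b) →
      (l.foldl (fun acc x => PySem.List.insertBy (fun a b => decide (k a < k b)) x acc) acc).filter p
        = (l.filter p).foldl (fun acc x => PySem.List.insertBy (fun a b => decide (k a < k b)) x acc)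
            (acc.filter p) := by
  intro l
  induction l with
  | nil => intro acc _; rfl
  | cons x l ih =>
    intro acc h
    have step := ih (PySem.List.insertBy (fun a b => decide (k a < k b)) x acc)
      (pairwise_insertBy k x acc h)
    cases hx : p x <;>
      simp [List.foldl_cons, hx, step, filter_insertBy k p x acc h]

-- sorted commutes with filter (stability)
theorem sorted_filter {α κ : Type} [LinearOrder κ] (k : α → κ) (p : α → Bool) (l : List α) :
    (PySem.List.sorted l k false).filter p = PySem.List.sorted (l.filter p) k false := by
  rw [PySem.List.sorted_eq_foldl_insertBy, PySem.List.sorted_eq_foldl_insertBy]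
  simpa using filter_foldl_insertBy k p l [] List.Pairwise.nil

-- mapping a key-preserving transformation commutes with insertBy
theorem map_insertBy {α β κ : Type} [LinearOrder κ] (kE : α → κ) (kD : β → κ) (D : α → β)
    (h : ∀ e, kD (D e) = kE e) (x : α) (m : List α) :
    PySem.List.insertBy (fun a b => decide (kD a < kD b)) (D x) (m.map D)
      = (PySem.List.insertBy (fun a b => decide (kE a < kE b)) x m).map D := by
  induction m with
  | nil => rfl
  | cons y ys ih =>
    by_cases hb : kE x < kE y <;>
      simp [PySem.List.insertBy, h, hb, ih]

theorem map_foldl_insertBy {α β κ : Type} [LinearOrder κ] (kE : α → κ) (kD : β → κ) (D : α → β)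
    (h : ∀ e, kD (D e) = kE e) :
    ∀ (l acc : List α),
      (l.map D).foldl (fun acc x => PySem.List.insertBy (fun a b => decide (kD a < kD b)) x acc) (acc.map D)
        = (l.foldl (fun acc x => PySem.List.insertBy (fun a b => decide (kE a < kE b)) x acc) acc).map D := by
  intro l
  induction l with
  | nil => intro acc; rfl
  | cons x l ih =>
    intro acc
    simp only [List.map_cons, List.foldl_cons]
    rw [map_insertBy kE kD D h x acc, ih]

-- sorted commutes with a key-preserving map
theorem sorted_map {α β κ : Type} [LinearOrder κ] (kE : α → κ) (kD : β → κ) (D : α → β)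
    (h : ∀ e, kD (D e) = kE e) (l : List α) :
    PySem.List.sorted (l.map D) kD false = (PySem.List.sorted l kE false).map D := by
  rw [PySem.List.sorted_eq_foldl_insertBy, PySem.List.sorted_eq_foldl_insertBy]
  simpa using map_foldl_insertBy kE kD D h l []

-- A's per-bucket sort equals B's filter-then-map over the globally sorted list
theorem bucket_eq {α β κ : Type} [LinearOrder κ] (kE : α → κ) (kD : β → κ) (D : α → β)
    (h : ∀ e, kD (D e) = kE e) (p : α → Bool) (l : List α) :
    PySem.List.sorted ((l.filter p).map D) kD false
      = ((PySem.List.sorted l kE false).filter p).map D := by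
  rw [sorted_map kE kD D h (l.filter p), sorted_filter kE p l]

-- A's one loop over three buckets is three independent filtered-append loops
theorem fold_triple (category sub_type : Option String) :
    ∀ (l : List (List (String × String))) (a b c : List (List (String × String))),
      l.foldl (fun st entity =>
          let country := pvGetS entity "country" "United States"
          if country == "United States" then (st.1 ++ [pvEntityData category sub_type entity], st.2.1, st.2.2)
          else if country == "Canada" then (st.1, st.2.1 ++ [pvEntityData category sub_type entity], st.2.2)
          else if country == "Mexico" then (st.1, st.2.1, st.2.2 ++ [pvEntityData category sub_type entity])
          else st) (a, b, c)
      = (l.foldl (fun acc e => if pvGetS e "country" "United States" == "United States" then acc ++ [pvEntityData category sub_type e] else acc) a,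
         l.foldl (fun acc e => if pvGetS e "country" "United States" == "Canada" then acc ++ [pvEntityData category sub_type e] else acc) b,
         l.foldl (fun acc e => if pvGetS e "country" "United States" == "Mexico" then acc ++ [pvEntityData category sub_type e] else acc) c) := by
  intro l
  induction l with
  | nil => intro a b c; rfl
  | cons e l ih =>
    intro a b c
    simp only [List.foldl_cons]
    by_cases h1 : pvGetS e "country" "United States" = "United States"
    · simp only [h1]
      simpa using ih _ _ _
    · by_cases h2 : pvGetS e "country" "United States" = "Canada"
      · simp only [h2]
        simpa [h1] using ih _ _ _
      · by_cases h3 : pvGetS e "country" "United States" = "Mexico"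
        · simp only [h3]
          simpa [h1, h2] using ih _ _ _
        · simpa [h1, h2, h3] using ih _ _ _

-- ===== VERDICT (by name: the statement is the Claim_ definition above) =====
theorem organize_by_country_spec : Claim_equal_organize_by_country := by
  intro entities key category sub_type _dom
  unfold Spec_organize_by_country organize_by_country organize_by_country_alt
  simp only [fold_triple category sub_type entities [] [] [], PySem.List.foldl_append_if,
    List.nil_append, List.map_cons, List.map_nil]
  rw [bucket_eq (fun e => pvGetS e "name" "") (fun x => pvGetS x "name" "")
        (pvEntityData category sub_type) (pvName_entityData category sub_type)
        (fun e => pvGetS e "country" "United States" == "United States") entities,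
      bucket_eq (fun e => pvGetS e "name" "") (fun x => pvGetS x "name" "")
        (pvEntityData category sub_type) (pvName_entityData category sub_type)
        (fun e => pvGetS e "country" "United States" == "Canada") entities,
      bucket_eq (fun e => pvGetS e "name" "") (fun x => pvGetS x "name" "")
        (pvEntityData category sub_type) (pvName_entityData category sub_type)
        (fun e => pvGetS e "country" "United States" == "Mexico") entities]
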